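-- pv_equiv track=rewrite | github.com/prime-slam/SLAM-Backend-Evaluation | project/utils/intervals.py | ids_list_to_intervals
-- ===== SOURCE A (Python) =====
-- from typing import List, Tuple
--
-- def ids_list_to_intervals(ids: List[int]) -> List[Tuple[int, int]]:
--     result = []
--     interval_start = None
--     prev_id = None
--     for index, identifier in enumerate(ids):
--         if prev_id is None or prev_id != identifier - 1:
--             if interval_start is not None:
--                 result.append((interval_start, prev_id))
--             interval_start = identifier
--
--         prev_id = identifier
--
--     if interval_start is not None:
--         result.append((interval_start, prev_id))
--
--     return result
-- ===== SOURCE B (Python) =====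
-- from typing import List, Tuple
-- from itertools import groupby
--
--
-- def ids_list_to_intervals(ids: List[int]) -> List[Tuple[int, int]]:
--     result = []
--     for _, grp in groupby(enumerate(ids), key=lambda pair: pair[1] - pair[0]):
--         items = list(grp)
--         result.append((items[0][1], items[-1][1]))
--     return result
-- ===== Notes on version B (the rewrite author's own statement) =====
-- stated objective: idiomatic
-- what changed: Replaced the hand-maintained interval_start/prev_id state machine with itertools.groupby over enumerate(ids) keyed by value-minus-index, which is constant exactly on maximal consecutive runs; each group yields (first, last).
import Mathlib
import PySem

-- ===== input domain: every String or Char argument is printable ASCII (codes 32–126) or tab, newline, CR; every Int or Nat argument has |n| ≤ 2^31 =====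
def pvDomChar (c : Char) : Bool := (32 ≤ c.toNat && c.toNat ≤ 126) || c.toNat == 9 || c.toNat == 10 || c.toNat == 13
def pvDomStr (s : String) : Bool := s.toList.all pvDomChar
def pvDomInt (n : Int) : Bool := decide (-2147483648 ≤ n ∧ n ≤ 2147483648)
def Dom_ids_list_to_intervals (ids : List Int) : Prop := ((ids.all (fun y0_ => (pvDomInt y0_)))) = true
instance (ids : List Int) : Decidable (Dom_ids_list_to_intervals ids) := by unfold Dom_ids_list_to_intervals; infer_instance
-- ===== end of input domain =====

-- B replaces A's hand-maintained interval_start/prev_id state machine with an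
-- itertools.groupby over enumerate(ids) keyed by value-minus-index (idiomatic, same cost).


-- ===== PORT A =====
-- state: (result, interval_start, prev_id); the loop index of enumerate is unused by A.
-- Python appends (interval_start, prev_id) only when interval_start ≠ None, where the loop
-- invariant makes prev_id an int too; `.getD 0` is exact there (the default is never read).
def aStep (st : List (Int × Int) × Option Int × Option Int) (identifier : Int) :
    List (Int × Int) × Option Int × Option Int :=
  let (result, interval_start, prev_id) := st
  if prev_id = none ∨ prev_id ≠ some (identifier - 1) then
    let result' := match interval_start with
      | some s => result ++ [(s, prev_id.getD 0)]
      | none => result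
    (result', some identifier, some identifier)
  else
    (result, interval_start, some identifier)

def ids_list_to_intervals (ids : List Int) : List (Int × Int) :=
  let (result, interval_start, prev_id) := ids.foldl aStep ([], none, none)
  match interval_start with
  | some s => result ++ [(s, prev_id.getD 0)]
  | none => result

-- ===== PORT B =====
-- groupby(enumerate(ids), key = pair[1] - pair[0]) as a fold collecting (finished groups, current group);
-- each group of enumerated pairs is turned into (first value, last value).
def bStep (st : List (List (Int × Int)) × List (Int × Int)) (p : Int × Int) :
    List (List (Int × Int)) × List (Int × Int) :=
  let (finished, cur) := st
  match cur with
  | [] => (finished, [p])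
  | q :: _ =>
    if p.2 - p.1 = q.2 - q.1 then (finished, cur ++ [p])
    else (finished ++ [cur], [p])

def groupToPair (g : List (Int × Int)) : Int × Int :=
  ((g.head?.map (·.2)).getD 0, (g.getLast?.map (·.2)).getD 0)

def ids_list_to_intervals_alt (ids : List Int) : List (Int × Int) :=
  let (finished, cur) := (PySem.List.enumerate ids).foldl bStep ([], [])
  let groups := if cur = [] then finished else finished ++ [cur]
  groups.map groupToPair

-- ===== PRECONDITION & SPEC =====
def Spec_ids_list_to_intervals (ids : List Int) (out : List (Int × Int)) : Prop := out = ids_list_to_intervals_alt ids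
instance (ids : List Int) (out : List (Int × Int)) : Decidable (Spec_ids_list_to_intervals ids out) := by unfold Spec_ids_list_to_intervals; infer_instance

-- ===== CLAIM (what is proved, stated in full; the proofs are below) =====
def Claim_equal_ids_list_to_intervals : Prop := ∀ (ids : List Int), Dom_ids_list_to_intervals ids → Spec_ids_list_to_intervals ids (ids_list_to_intervals ids)

-- ===== LEMMAS AND PROOFS =====

-- finishing steps, factored for the induction
def aFin (st : List (Int × Int) × Option Int × Option Int) : List (Int × Int) :=
  match st.2.1 with
  | some s => st.1 ++ [(s, st.2.2.getD 0)]
  | none => st.1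

def bFin (st : List (List (Int × Int)) × List (Int × Int)) : List (Int × Int) :=
  (if st.2 = [] then st.1 else st.1 ++ [st.2]).map groupToPair

-- Main loop invariant: mid-run, A's state is (res, some s, some p) and B's state is
-- (fin, cur) with res = fin.map groupToPair, cur a nonempty group whose head value is s,
-- last value is p, and head key s - i0 equals p - n + 1 (n = next enumeration index).
theorem loop_eq (ids : List Int) : ∀ (n i0 s p : Int) (res : List (Int × Int))
    (fin : List (List (Int × Int))) (cur : List (Int × Int)),
    res = fin.map groupToPair →
    cur.head? = some (i0, s) →
    (cur.getLast?.map (·.2)) = some p →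
    s - i0 = p - n + 1 →
    aFin (ids.foldl aStep (res, some s, some p)) =
      bFin ((PySem.List.enumerate ids n).foldl bStep (fin, cur)) := by
  induction ids with
  | nil =>
    intro n i0 s p res fin cur hres hhead hlast _
    simp [aFin, bFin, PySem.List.enumerate]
    have hcur : cur ≠ [] := by intro h; simp [h] at hhead
    simp [hcur, hres, groupToPair, hhead, hlast]
  | cons v rest ih =>
    intro n i0 s p res fin cur hres hhead hlast hkey
    have hcur : cur ≠ [] := by intro h; simp [h] at hhead
    obtain ⟨q, cur', hq⟩ : ∃ q cur', cur = q :: cur' := by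
      cases cur with
      | nil => exact absurd rfl hcur
      | cons q cur' => exact ⟨q, cur', rfl⟩
    have hqv : q = (i0, s) := by simpa [hq] using hhead
    rw [PySem.List.enumerate_cons]
    by_cases hc : p = v - 1
    · -- consecutive: both continue the current run
      have hkeyb : v - n = q.2 - q.1 := by simp [hqv]; omega
      have hastep : aStep (res, some s, some p) v = (res, some s, some v) := by
        simp [aStep, hc]
      have hbstep : bStep (fin, cur) (n, v) = (fin, cur ++ [(n, v)]) := by
        simp [bStep, hq, hkeyb]
      rw [List.foldl_cons, List.foldl_cons, hastep, hbstep]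
      exact ih (n + 1) i0 s v res fin (cur ++ [(n, v)]) hres
        (by simp [hq]; exact hqv ▸ rfl)
        (by simp [List.getLast?_append])
        (by omega)
    · -- run breaks: A flushes (s, p); B closes cur and opens [(n, v)]
      have hkeyb : ¬ (v - n = q.2 - q.1) := by simp [hqv]; omega
      have hastep : aStep (res, some s, some p) v =
          (res ++ [(s, p)], some v, some v) := by
        simp [aStep]
        intro h; exact absurd (by omega : p = v - 1) hc
      have hbstep : bStep (fin, cur) (n, v) = (fin ++ [cur], [(n, v)]) := by
        simp [bStep, hq, hkeyb]
      rw [List.foldl_cons, List.foldl_cons, hastep, hbstep]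
      exact ih (n + 1) n v v (res ++ [(s, p)]) (fin ++ [cur]) [(n, v)]
        (by simp [hres, groupToPair, hhead, hlast])
        (by simp) (by simp) (by omega)

-- ===== VERDICT (by name: the statement is the Claim_ definition above) =====
theorem ids_list_to_intervals_spec : Claim_equal_ids_list_to_intervals := by
  intro ids _
  show ids_list_to_intervals ids = ids_list_to_intervals_alt ids
  cases ids with
  | nil => rfl
  | cons v rest =>
    have ha : ids_list_to_intervals (v :: rest) =
        aFin (rest.foldl aStep ([], some v, some v)) := by
      simp [ids_list_to_intervals, aStep, aFin]
    have hb : ids_list_to_intervals_alt (v :: rest) =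
        bFin ((PySem.List.enumerate rest 1).foldl bStep ([], [(0, v)])) := by
      simp [ids_list_to_intervals_alt, PySem.List.enumerate_cons, bStep, bFin]
    rw [ha, hb]
    exact loop_eq rest 1 0 v v [] [] [(0, v)] (by simp) (by simp) (by simp) (by omega)
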